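-- pv_equiv track=rewrite | github.com/Andrew80t7/Tochka | run2.py | find_target_gateway
-- ===== SOURCE A (Python) =====
-- from collections import deque
--
-- def bfs(start, adj):
--     dist = {start: 0}
--     q = deque([start])
--     while q:
--         u = q.popleft()
--         for w in adj.get(u, ()):
--             if w not in dist:
--                 dist[w] = dist[u] + 1
--                 q.append(w)
--     return dist
--
-- def find_target_gateway(adj, virus):
--     dist = bfs(virus, adj)
--     best = None
--     best_dist = None
--     for node, dist in dist.items():
--         if node.isupper():
--             if best is None or dist < best_dist or (dist == best_dist and node < best):
--                 best = node
--                 best_dist = dist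
--     return best, best_dist
-- ===== SOURCE B (Python) =====
-- def find_target_gateway(adj, virus):
--     # Level-synchronous BFS: stop at the first level containing an uppercase
--     # gateway and return its lexicographically smallest node with the level.
--     visited = {virus}
--     frontier = [virus]
--     level = 0
--     while frontier:
--         gates = [n for n in frontier if n.isupper()]
--         if gates:
--             return min(gates), level
--         nxt = []
--         for u in frontier:
--             for w in adj.get(u, ()):
--                 if w not in visited:
--                     visited.add(w)
--                     nxt.append(w)
--         frontier = nxt
--         level += 1
--     return None, None
-- ===== Notes on version B (the rewrite author's own statement) =====
-- stated objective: alternative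
-- what changed: Replaces A's queue-based BFS that builds a complete distance dict and then scans all its items for the nearest/lexicographically-smallest uppercase node by a level-synchronous BFS that checks each frontier for uppercase gateways and stops at the first level containing one.
import Mathlib
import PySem

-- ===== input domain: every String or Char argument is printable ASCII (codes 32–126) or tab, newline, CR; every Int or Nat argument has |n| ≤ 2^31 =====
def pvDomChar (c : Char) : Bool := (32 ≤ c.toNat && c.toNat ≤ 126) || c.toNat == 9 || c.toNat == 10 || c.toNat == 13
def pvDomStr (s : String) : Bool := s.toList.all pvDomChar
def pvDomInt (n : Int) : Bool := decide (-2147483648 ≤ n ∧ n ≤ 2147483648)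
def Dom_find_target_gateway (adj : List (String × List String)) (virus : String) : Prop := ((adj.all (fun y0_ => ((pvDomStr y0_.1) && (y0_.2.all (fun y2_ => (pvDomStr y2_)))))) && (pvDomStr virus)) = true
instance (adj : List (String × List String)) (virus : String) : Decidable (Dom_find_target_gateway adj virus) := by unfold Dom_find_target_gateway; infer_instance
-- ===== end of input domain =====

-- B replaces A's full-distance-dict BFS + posterior min-scan by a level-synchronous BFS
-- that stops at the first level containing an uppercase gateway (objective: alternative).

-- s.isupper() on the ASCII domain: some cased (= alphabetic) character and no lowercase one
def pyIsupper (s : String) : Bool :=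
  s.toList.any PySem.Chars.isupper && !(s.toList.any PySem.Chars.islower)

-- adj.get(u, ()) (adj is a dict: association list, first match)
def pvNbrs (adj : List (String × List String)) (u : String) : List String :=
  (PySem.Dict.mk adj).getD u []

-- fuel bound for both loops: 1 + number of distinct candidate nodes (totalization guard only)
def pvNodeBound (adj : List (String × List String)) (virus : String) : Nat :=
  (PySem.Set.ofList (virus :: (adj.map (·.2)).flatten)).length

-- ===== PORT A =====
-- inner loop of bfs: for w in adj.get(u, ()): if w not in dist: dist[w] = dist[u] + 1; q.append(w)
-- (dist[u]: u is always a key of dist here, so the 0 default of getD is never read)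
def pvBfsInner (u : String) (s : PySem.Dict String Int × List String) (w : String) :
    PySem.Dict String Int × List String :=
  if s.1.contains w then s else (s.1.insert w (s.1.getD u 0 + 1), s.2 ++ [w])

-- while q: u = q.popleft(); …   (fuel only makes the loop structurally total)
def pvBfsLoop (adj : List (String × List String)) :
    Nat → PySem.Dict String Int → List String → PySem.Dict String Int
  | _, dist, [] => dist
  | 0, dist, _ :: _ => dist
  | fuel + 1, dist, u :: rest =>
      let st := (pvNbrs adj u).foldl (pvBfsInner u) (dist, rest)
      pvBfsLoop adj fuel st.1 st.2

def pvBfs (start : String) (adj : List (String × List String)) : PySem.Dict String Int :=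
  pvBfsLoop adj (1 + pvNodeBound adj start) (PySem.Dict.empty.insert start 0) [start]

-- the scan over dist.items(); (best, best_dist) are none/none or some/some together,
-- so the getD defaults are never read
def pvScanStep (st : Option String × Option Int) (p : String × Int) :
    Option String × Option Int :=
  if pyIsupper p.1 then
    if st.1 = none ∨ p.2 < st.2.getD 0 ∨ (p.2 = st.2.getD 0 ∧ p.1 < st.1.getD "") then
      (some p.1, some p.2)
    else st
  else st

def find_target_gateway (adj : List (String × List String)) (virus : String) :
    Option String × Option Int :=
  ((pvBfs virus adj).items).foldl pvScanStep (none, none)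

-- ===== PORT B =====
-- if w not in visited: visited.add(w); nxt.append(w)
def pvAddFresh (s : PySem.Set String × List String) (w : String) :
    PySem.Set String × List String :=
  if PySem.Set.contains s.1 w then s else (PySem.Set.add s.1 w, s.2 ++ [w])

def pvExpandNode (adj : List (String × List String))
    (s : PySem.Set String × List String) (u : String) : PySem.Set String × List String :=
  (pvNbrs adj u).foldl pvAddFresh s

def pvExpand (adj : List (String × List String)) (visited : PySem.Set String)
    (frontier : List String) : PySem.Set String × List String :=
  frontier.foldl (pvExpandNode adj) (visited, ([] : List String))

-- while frontier: …  (fuel only makes the loop structurally total)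
def pvLevelLoop (adj : List (String × List String)) :
    Nat → PySem.Set String → List String → Int → Option String × Option Int
  | 0, _, _, _ => (none, none)
  | fuel + 1, visited, frontier, level =>
      if frontier = [] then (none, none)
      else
        let gates := frontier.filter pyIsupper
        if gates = [] then
          let st := pvExpand adj visited frontier
          pvLevelLoop adj fuel st.1 st.2 (level + 1)
        else (PySem.List.min? gates (fun x => x), some level)

def find_target_gateway_alt (adj : List (String × List String)) (virus : String) :
    Option String × Option Int :=
  pvLevelLoop adj (1 + pvNodeBound adj virus) (PySem.Set.ofList [virus]) [virus] 0

-- ===== PRECONDITION & SPEC =====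
def Spec_find_target_gateway (adj : List (String × List String)) (virus : String) (out : Option String × Option Int) : Prop := out = find_target_gateway_alt adj virus
instance (adj : List (String × List String)) (virus : String) (out : Option String × Option Int) : Decidable (Spec_find_target_gateway adj virus out) := by unfold Spec_find_target_gateway; infer_instance

-- ===== CLAIM (what is proved, stated in full; the proofs are below) =====
def Claim_equal_find_target_gateway : Prop := ∀ (adj : List (String × List String)) (virus : String), Dom_find_target_gateway adj virus → Spec_find_target_gateway adj virus (find_target_gateway adj virus)

-- ===== LEMMAS AND PROOFS =====

-- abbreviation used only in the proofs: insert a batch of fresh keys with one value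
def pvIns (news : List String) (v : Int) (d : PySem.Dict String Int) : PySem.Dict String Int :=
  news.foldl (fun d w => d.insert w v) d

lemma pvIns_getD_of_not_mem (news : List String) (v : Int) (d : PySem.Dict String Int)
    (k : String) (v0 : Int) (h : k ∉ news) : (pvIns news v d).getD k v0 = d.getD k v0 := by
  induction news generalizing d with
  | nil => rfl
  | cons w ws ih =>
      simp only [pvIns, List.foldl_cons] at *
      rw [ih _ (by simp_all), PySem.Dict.getD_insert]
      simp_all

lemma pvIns_contains_of_contains (news : List String) (v : Int) (d : PySem.Dict String Int)
    (k : String) (h : d.contains k = true) : (pvIns news v d).contains k = true := by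
  induction news generalizing d with
  | nil => exact h
  | cons w ws ih =>
      simp only [pvIns, List.foldl_cons] at *
      exact ih _ (by rw [PySem.Dict.contains_insert]; simp [h])

lemma pvIns_items (news : List String) (v : Int) (d : PySem.Dict String Int)
    (hfresh : ∀ w ∈ news, d.contains w = false) (hnd : news.Nodup) :
    (pvIns news v d).items = d.items ++ news.map (fun w => (w, v)) := by
  exact PySem.Dict.items_foldl_insert_fresh news (fun w => w) (fun _ => v) d hfresh (by simpa)

lemma pvIns_keys (news : List String) (v : Int) (d : PySem.Dict String Int)
    (hfresh : ∀ w ∈ news, d.contains w = false) (hnd : news.Nodup) :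
    (pvIns news v d).keys = d.keys ++ news := by
  unfold PySem.Dict.keys
  rw [pvIns_items news v d hfresh hnd]
  simp [Function.comp_def]

lemma pvIns_nodup_keys (news : List String) (v : Int) (d : PySem.Dict String Int)
    (h : d.keys.Nodup) : (pvIns news v d).keys.Nodup :=
  PySem.Dict.nodup_keys_foldl_insert news _ d h

lemma pvIns_getD_of_mem (news : List String) (v : Int) (d : PySem.Dict String Int)
    (k : String) (v0 : Int) (hnd : news.Nodup) (h : k ∈ news) :
    (pvIns news v d).getD k v0 = v := by
  induction news generalizing d with
  | nil => simp at h
  | cons w ws ih =>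
      rw [show pvIns (w :: ws) v d = pvIns ws v (d.insert w v) from rfl]
      rcases List.mem_cons.1 h with rfl | hk
      · rw [pvIns_getD_of_not_mem _ _ _ _ _ (by simp_all), PySem.Dict.getD_insert]; simp
      · exact ih _ (hnd.of_cons) hk

lemma contains_keys (d : PySem.Dict String Int) (w : String) :
    PySem.Set.contains d.keys w = d.contains w := by
  simp only [PySem.Set.contains, PySem.Dict.contains, PySem.Dict.keys]
  rw [Bool.eq_iff_iff]
  simp only [List.contains_iff_exists_mem_beq, List.any_eq_true, List.mem_map, beq_iff_eq]
  aesop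

-- membership in neighbour lists
lemma nbrs_subset (adj : List (String × List String)) (u w : String)
    (h : w ∈ pvNbrs adj u) : w ∈ (adj.map (·.2)).flatten := by
  induction adj with
  | nil => simp [pvNbrs, PySem.Dict.getD, PySem.Dict.get?] at h
  | cons p ps ih =>
      obtain ⟨k, vs⟩ := p
      simp only [pvNbrs, PySem.Dict.getD, PySem.Dict.get?_mk_cons] at h
      by_cases hk : (k == u) = true
      · simp only [hk, if_pos, Option.getD_some] at h
        simp only [List.map_cons, List.flatten_cons, List.mem_append]
        exact Or.inl h
      · simp only [hk, if_neg, Bool.false_eq_true, not_false_iff] at h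
        simp only [List.map_cons, List.flatten_cons, List.mem_append]
        exact Or.inr (ih (by simpa [pvNbrs, PySem.Dict.getD] using h))

-- L0: one source node's neighbour scan, A-side and B-side in lockstep
lemma sim_node (ws : List String) (u : String) (dist : PySem.Dict String Int)
    (q acc : List String) (L : Int)
    (hnd : dist.keys.Nodup) (hu : dist.contains u = true) (hL : dist.getD u 0 = L) :
    ∃ news : List String,
      ws.foldl (pvBfsInner u) (dist, q) = (pvIns news (L + 1) dist, q ++ news) ∧
      ws.foldl pvAddFresh (dist.keys, acc) = (dist.keys ++ news, acc ++ news) ∧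
      news.Nodup ∧ (∀ w ∈ news, dist.contains w = false) ∧ (∀ w ∈ news, w ∈ ws) := by
  induction ws generalizing dist q acc with
  | nil => exact ⟨[], by simp [pvIns], by simp, by simp, by simp, by simp⟩
  | cons w ws ih =>
      simp only [List.foldl_cons]
      by_cases hw : dist.contains w = true
      · rw [show pvBfsInner u (dist, q) w = (dist, q) by simp [pvBfsInner, hw],
          show pvAddFresh (dist.keys, acc) w = (dist.keys, acc) by
            unfold pvAddFresh; rw [contains_keys, hw]; simp]
        obtain ⟨news, h1, h2, h3, h4, h5⟩ := ih dist q acc hnd hu hL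
        exact ⟨news, h1, h2, h3, h4, fun x hx => List.mem_cons_of_mem _ (h5 x hx)⟩
      · have hw' : dist.contains w = false := by simpa using hw
        have hne : u ≠ w := fun e => by rw [e] at hu; rw [hu] at hw'; simp at hw'
        rw [show pvBfsInner u (dist, q) w = (dist.insert w (L + 1), q ++ [w]) by
            simp [pvBfsInner, hw', hL],
          show pvAddFresh (dist.keys, acc) w = (dist.keys ++ [w], acc ++ [w]) by
            unfold pvAddFresh PySem.Set.add
            rw [contains_keys, hw']; simp]
        have hnd1 : (dist.insert w (L + 1)).keys.Nodup :=
          PySem.Dict.nodup_keys_insert _ _ _ hnd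
        have hu1 : (dist.insert w (L + 1)).contains u = true := by
          rw [PySem.Dict.contains_insert]; simp [hu]
        have hL1 : (dist.insert w (L + 1)).getD u 0 = L := by
          rw [PySem.Dict.getD_insert]; simp [hne, hL]
        have hkeys1 : (dist.insert w (L + 1)).keys = dist.keys ++ [w] :=
          PySem.Dict.keys_insert_of_not_contains _ _ hw'
        obtain ⟨news, h1, h2, h3, h4, h5⟩ :=
          ih (dist.insert w (L + 1)) (q ++ [w]) (acc ++ [w]) hnd1 hu1 hL1
        refine ⟨w :: news, ?_, ?_, ?_, ?_, ?_⟩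
        · rw [h1, show pvIns (w :: news) (L + 1) dist =
              pvIns news (L + 1) (dist.insert w (L + 1)) from rfl]
          simp
        · rw [hkeys1] at h2; rw [h2]; simp
        · refine List.nodup_cons.2 ⟨fun hmem => ?_, h3⟩
          have := h4 w hmem
          rw [PySem.Dict.contains_insert] at this; simp at this
        · intro x hx
          rcases List.mem_cons.1 hx with rfl | hx'
          · exact hw'
          · have := h4 x hx'
            rw [PySem.Dict.contains_insert] at this
            simpa using (Bool.or_eq_false_iff.1 this).2
        · intro x hx
          rcases List.mem_cons.1 hx with rfl | hx'
          · exact List.mem_cons_self ..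
          · exact List.mem_cons_of_mem _ (h5 x hx')

-- L1: a whole frontier, A-side queue processing and B-side expansion in lockstep
lemma sim_level (f : List String) (adj : List (String × List String))
    (dist : PySem.Dict String Int) (t acc : List String) (L : Int) (fuel : Nat)
    (hnd : dist.keys.Nodup)
    (hf : ∀ u ∈ f, dist.contains u = true ∧ dist.getD u 0 = L) :
    ∃ news : List String,
      pvBfsLoop adj (f.length + fuel) dist (f ++ t) =
        pvBfsLoop adj fuel (pvIns news (L + 1) dist) (t ++ news) ∧
      f.foldl (pvExpandNode adj) (dist.keys, acc) = (dist.keys ++ news, acc ++ news) ∧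
      news.Nodup ∧ (∀ w ∈ news, dist.contains w = false) ∧
      (∀ w ∈ news, ∃ u ∈ f, w ∈ pvNbrs adj u) := by
  induction f generalizing dist t acc with
  | nil => exact ⟨[], by simp [pvIns], by simp, by simp, by simp, by simp⟩
  | cons u f' ih =>
      obtain ⟨hu, hL⟩ := hf u (List.mem_cons_self ..)
      obtain ⟨news₁, hA1, hB1, hnd₁, hfresh₁, hmem₁⟩ :=
        sim_node (pvNbrs adj u) u dist (f' ++ t) acc L hnd hu hL
      have hd₁ := pvIns_nodup_keys news₁ (L + 1) dist hnd
      have hk₁ : (pvIns news₁ (L + 1) dist).keys = dist.keys ++ news₁ :=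
        pvIns_keys news₁ (L + 1) dist hfresh₁ hnd₁
      have hf' : ∀ v ∈ f', (pvIns news₁ (L + 1) dist).contains v = true ∧
          (pvIns news₁ (L + 1) dist).getD v 0 = L := by
        intro v hv
        obtain ⟨hv1, hv2⟩ := hf v (List.mem_cons_of_mem _ hv)
        have hvn : v ∉ news₁ := fun hmem => by rw [hfresh₁ v hmem] at hv1; simp at hv1
        exact ⟨pvIns_contains_of_contains _ _ _ _ hv1,
          by rw [pvIns_getD_of_not_mem _ _ _ _ _ hvn]; exact hv2⟩
      obtain ⟨news₂, hA2, hB2, hnd₂, hfresh₂, hmem₂⟩ :=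
        ih (pvIns news₁ (L + 1) dist) (t ++ news₁) (acc ++ news₁) hd₁ hf'
      have hdisj : ∀ x ∈ news₂, x ∉ news₁ := by
        intro x hx hx1
        have := hfresh₂ x hx
        rw [(PySem.Dict.contains_iff_mem_keys _ _).2 (by rw [hk₁]; simp [hx1])] at this
        simp at this
      refine ⟨news₁ ++ news₂, ?_, ?_, ?_, ?_, ?_⟩
      · have hstep : pvBfsLoop adj ((u :: f').length + fuel) dist ((u :: f') ++ t) =
            pvBfsLoop adj (f'.length + fuel) (pvIns news₁ (L + 1) dist)
              ((f' ++ t) ++ news₁) := by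
          rw [show (u :: f').length + fuel = (f'.length + fuel) + 1 by simp; omega]
          simp only [List.cons_append, pvBfsLoop, hA1]
        rw [hstep, show (f' ++ t) ++ news₁ = f' ++ (t ++ news₁) by simp, hA2,
          show pvIns (news₁ ++ news₂) (L + 1) dist =
            pvIns news₂ (L + 1) (pvIns news₁ (L + 1) dist) by simp [pvIns], ]
        simp
      · rw [List.foldl_cons, show pvExpandNode adj (dist.keys, acc) u =
            ((pvIns news₁ (L + 1) dist).keys, acc ++ news₁) by
              rw [hk₁]; exact hB1, hB2, hk₁]
        simp
      · rw [List.nodup_append]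
        refine ⟨hnd₁, hnd₂, ?_⟩
        intro x hx y hy e
        exact hdisj y hy (e ▸ hx)
      · intro x hx
        rcases List.mem_append.1 hx with hx1 | hx2
        · exact hfresh₁ x hx1
        · cases h : dist.contains x
          · rfl
          · have := hfresh₂ x hx2
            rw [pvIns_contains_of_contains news₁ (L + 1) dist x h] at this
            simp at this
      · intro x hx
        rcases List.mem_append.1 hx with hx1 | hx2
        · exact ⟨u, List.mem_cons_self .., hmem₁ x hx1⟩
        · obtain ⟨v, hv, hvm⟩ := hmem₂ x hx2
          exact ⟨v, List.mem_cons_of_mem _ hv, hvm⟩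

-- L2: everything A's loop adds beyond the current dict has value > the queue minimum
lemma suffix_vals (fuel : Nat) (adj : List (String × List String))
    (dist : PySem.Dict String Int) (q : List String) (M : Int)
    (hnd : dist.keys.Nodup)
    (hq : ∀ u ∈ q, dist.contains u = true ∧ M ≤ dist.getD u 0) :
    ∃ rest, (pvBfsLoop adj fuel dist q).items = dist.items ++ rest ∧
      ∀ p ∈ rest, M + 1 ≤ p.2 := by
  induction fuel generalizing dist q with
  | zero => cases q with
    | nil => exact ⟨[], by simp [pvBfsLoop], by simp⟩
    | cons u qr => exact ⟨[], by simp [pvBfsLoop], by simp⟩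
  | succ fuel ih =>
      cases q with
      | nil => exact ⟨[], by simp [pvBfsLoop], by simp⟩
      | cons u qr =>
          obtain ⟨hu, hM⟩ := hq u (List.mem_cons_self ..)
          obtain ⟨news₁, hA1, _, hnd₁, hfresh₁, hmem₁⟩ :=
            sim_node (pvNbrs adj u) u dist qr [] (dist.getD u 0) hnd hu rfl
          have hd₁ := pvIns_nodup_keys news₁ (dist.getD u 0 + 1) dist hnd
          have hq' : ∀ v ∈ qr ++ news₁,
              (pvIns news₁ (dist.getD u 0 + 1) dist).contains v = true ∧
              M ≤ (pvIns news₁ (dist.getD u 0 + 1) dist).getD v 0 := by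
            intro v hv
            rcases List.mem_append.1 hv with hv1 | hv2
            · obtain ⟨hc, hval⟩ := hq v (List.mem_cons_of_mem _ hv1)
              have hvn : v ∉ news₁ := fun hmem => by rw [hfresh₁ v hmem] at hc; simp at hc
              exact ⟨pvIns_contains_of_contains _ _ _ _ hc,
                by rw [pvIns_getD_of_not_mem _ _ _ _ _ hvn]; exact hval⟩
            · refine ⟨?_, ?_⟩
              · have : (pvIns news₁ (dist.getD u 0 + 1) dist).keys =
                    dist.keys ++ news₁ := pvIns_keys _ _ _ hfresh₁ hnd₁
                rw [PySem.Dict.contains_iff_mem_keys, this]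
                simp [hv2]
              · rw [pvIns_getD_of_mem _ _ _ _ _ hnd₁ hv2]; omega
          obtain ⟨rest', hit', hval'⟩ := ih (pvIns news₁ (dist.getD u 0 + 1) dist)
            (qr ++ news₁) hd₁ hq'
          refine ⟨news₁.map (fun w => (w, dist.getD u 0 + 1)) ++ rest', ?_, ?_⟩
          · rw [show pvBfsLoop adj (fuel + 1) dist (u :: qr) =
                pvBfsLoop adj fuel (pvIns news₁ (dist.getD u 0 + 1) dist) (qr ++ news₁) by
                  simp only [pvBfsLoop, hA1], hit',
              pvIns_items news₁ (dist.getD u 0 + 1) dist hfresh₁ hnd₁]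
            simp
          · intro p hp
            rcases List.mem_append.1 hp with hp1 | hp2
            · obtain ⟨x, _, rfl⟩ := List.mem_map.1 hp1
              simp; omega
            · have := hval' p hp2; omega

-- S1: the scan ignores non-gateway items
lemma scan_skip (l : List (String × Int)) (st : Option String × Option Int)
    (h : ∀ p ∈ l, pyIsupper p.1 = false) : l.foldl pvScanStep st = st := by
  induction l generalizing st with
  | nil => rfl
  | cons p ps ih =>
      rw [List.foldl_cons, show pvScanStep st p = st by
        simp [pvScanStep, h p (List.mem_cons_self ..)]]
      exact ih _ (fun q hq => h q (List.mem_cons_of_mem _ hq))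

-- S2a: the scan over same-level items with a best at that level is a running min
lemma scan_min (l : List String) (level : Int) (b : String) :
    (l.map (fun u => (u, level))).foldl pvScanStep (some b, some level) =
      (some ((l.filter pyIsupper).foldl min b), some level) := by
  induction l generalizing b with
  | nil => rfl
  | cons u us ih =>
      by_cases hu : pyIsupper u = true
      · have hstep : pvScanStep (some b, some level) (u, level) =
            (some (min b u), some level) := by
          by_cases hub : u < b
          · simp [pvScanStep, hu, hub, le_of_lt]
          · simp [pvScanStep, hu, hub, not_lt.1 hub]
        rw [List.map_cons, List.foldl_cons, hstep, List.filter_cons_of_pos hu,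
          List.foldl_cons]
        exact ih (min b u)
      · have hstep : pvScanStep (some b, some level) (u, level) = (some b, some level) := by
          simp [pvScanStep, hu]
        rw [List.map_cons, List.foldl_cons, hstep,
          List.filter_cons_of_neg (by simp [hu])]
        exact ih b

-- S2: the scan over same-level items from the empty state
lemma scan_level (l : List String) (level : Int) :
    (l.map (fun u => (u, level))).foldl pvScanStep (none, none) =
      match l.filter pyIsupper with
      | [] => (none, none)
      | g :: gs => (some (gs.foldl min g), some level) := by
  induction l with
  | nil => rfl
  | cons u us ih =>
      by_cases hu : pyIsupper u = true
      · have hstep : pvScanStep (none, none) (u, level) = (some u, some level) := by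
          simp [pvScanStep, hu]
        rw [List.map_cons, List.foldl_cons, hstep, List.filter_cons_of_pos hu, scan_min]
      · have hstep : pvScanStep (none, none) (u, level) = (none, none) := by
          simp [pvScanStep, hu]
        rw [List.map_cons, List.foldl_cons, hstep, List.filter_cons_of_neg (by simp [hu])]
        exact ih

-- S3: items strictly deeper than the found level never improve the best
lemma scan_deep (l : List (String × Int)) (b : String) (level : Int)
    (h : ∀ p ∈ l, level < p.2) :
    l.foldl pvScanStep (some b, some level) = (some b, some level) := by
  induction l with
  | nil => rfl
  | cons p ps ih =>
      have hp := h p (List.mem_cons_self ..)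
      have hstep : pvScanStep (some b, some level) p = (some b, some level) := by
        simp only [pvScanStep]
        split
        · rw [if_neg]
          rintro (h1 | h2 | ⟨h3, _⟩)
          · simp at h1
          · simp at h2; omega
          · simp at h3; omega
        · rfl
      rw [List.foldl_cons, hstep]
      exact ih (fun q hq => h q (List.mem_cons_of_mem _ hq))

lemma levelLoop_nil (adj : List (String × List String)) (fuel : Nat)
    (v : PySem.Set String) (level : Int) :
    pvLevelLoop adj fuel v [] level = (none, none) := by
  cases fuel <;> rfl

-- MAIN: A's scan of the finished BFS dict equals B's level loop, from any aligned state
lemma main_sim (fuelB : Nat) (adj : List (String × List String)) (virus : String)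
    (dist : PySem.Dict String Int) (frontier : List String) (level : Int)
    (pre : List (String × Int)) (fuelA : Nat)
    (hnd : dist.keys.Nodup)
    (hitems : dist.items = pre ++ frontier.map (fun u => (u, level)))
    (hpre : ∀ p ∈ pre, pyIsupper p.1 = false)
    (hfv : ∀ u ∈ frontier, dist.getD u 0 = level)
    (hkeys : ∀ x ∈ dist.keys, x ∈ virus :: (adj.map (·.2)).flatten)
    (hA : frontier.length + (pvNodeBound adj virus - dist.keys.length) ≤ fuelA)
    (hB : 1 + (pvNodeBound adj virus - dist.keys.length) ≤ fuelB) :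
    ((pvBfsLoop adj fuelA dist frontier).items).foldl pvScanStep (none, none) =
      pvLevelLoop adj fuelB dist.keys frontier level := by
  induction fuelB generalizing dist frontier level pre fuelA with
  | zero => omega
  | succ fb ih =>
      by_cases hfr : frontier = []
      · subst hfr
        rw [show pvBfsLoop adj fuelA dist [] = dist by cases fuelA <;> rfl, hitems]
        simp only [List.map_nil, List.append_nil]
        rw [scan_skip pre _ hpre]
        simp [pvLevelLoop]
      · -- frontier is nonempty
        have hsub : ∀ u ∈ frontier, dist.contains u = true := by
          intro u hu
          rw [PySem.Dict.contains_iff_mem_keys]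
          unfold PySem.Dict.keys
          rw [hitems]
          simp only [List.map_append, List.map_map, List.mem_append, List.mem_map]
          exact Or.inr ⟨u, hu, rfl⟩
        obtain ⟨news, hA1, hB1, hndn, hfresh, hmem⟩ :=
          sim_level frontier adj dist [] [] level (fuelA - frontier.length) hnd
            (fun u hu => ⟨hsub u hu, hfv u hu⟩)
        have hAstep : pvBfsLoop adj fuelA dist frontier =
            pvBfsLoop adj (fuelA - frontier.length) (pvIns news (level + 1) dist) news := by
          have e3 : pvBfsLoop adj (frontier.length + (fuelA - frontier.length)) dist
              (frontier ++ []) = pvBfsLoop adj fuelA dist frontier := by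
            rw [List.append_nil]
            congr 1
            omega
          rw [← e3, hA1]; simp
        have hk₁ : (pvIns news (level + 1) dist).keys = dist.keys ++ news :=
          pvIns_keys news (level + 1) dist hfresh hndn
        have hit₁ : (pvIns news (level + 1) dist).items =
            dist.items ++ news.map (fun w => (w, level + 1)) :=
          pvIns_items news (level + 1) dist hfresh hndn
        have hkeyslen : (dist.keys ++ news).length ≤ pvNodeBound adj virus := by
          have hnodup : (dist.keys ++ news).Nodup := by
            rw [← hk₁]; exact pvIns_nodup_keys news (level + 1) dist hnd
          have hsubn : ∀ x ∈ dist.keys ++ news,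
              x ∈ PySem.Set.ofList (virus :: (adj.map (·.2)).flatten) := by
            intro x hx
            rw [PySem.Set.mem_ofList]
            rcases List.mem_append.1 hx with hx1 | hx2
            · exact hkeys x hx1
            · obtain ⟨u, _, hum⟩ := hmem x hx2
              exact List.mem_cons_of_mem _ (nbrs_subset adj u x hum)
          exact (List.subperm_of_subset hnodup hsubn).length_le
        -- unfold one level of B's loop
        rw [show pvLevelLoop adj (fb + 1) dist.keys frontier level =
            (if frontier.filter pyIsupper = [] then
              pvLevelLoop adj fb (pvExpand adj dist.keys frontier).1
                (pvExpand adj dist.keys frontier).2 (level + 1)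
            else (PySem.List.min? (frontier.filter pyIsupper) (fun x => x), some level)) by
          simp only [pvLevelLoop, hfr]; rfl]
        have hBexp : pvExpand adj dist.keys frontier = (dist.keys ++ news, news) := by
          unfold pvExpand; rw [hB1]; simp
        by_cases hg : frontier.filter pyIsupper = []
        · rw [if_pos hg, hBexp]
          have hupfr : ∀ u ∈ frontier, pyIsupper u = false := by
            intro u hu
            rcases Bool.eq_false_or_eq_true (pyIsupper u) with h | h
            · exact absurd (List.mem_filter.2 ⟨hu, h⟩) (by rw [hg]; simp)
            · exact h
          by_cases hn : news = []
          · subst hn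
            rw [hAstep, show pvIns [] (level + 1) dist = dist from rfl,
              show pvBfsLoop adj (fuelA - frontier.length) dist [] = dist by
                cases (fuelA - frontier.length) <;> rfl, hitems]
            rw [List.foldl_append, scan_skip pre _ hpre,
              scan_skip _ _ (by
                intro p hp
                obtain ⟨x, hx, rfl⟩ := List.mem_map.1 hp
                exact hupfr x hx)]
            simp [levelLoop_nil]
          · rw [hAstep]
            have := ih (pvIns news (level + 1) dist) news (level + 1)
              (pre ++ frontier.map (fun u => (u, level))) (fuelA - frontier.length)
              (pvIns_nodup_keys news (level + 1) dist hnd)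
              (by rw [hit₁, hitems])
              (by
                intro p hp
                rcases List.mem_append.1 hp with hp1 | hp2
                · exact hpre p hp1
                · obtain ⟨x, hx, rfl⟩ := List.mem_map.1 hp2
                  exact hupfr x hx)
              (fun u hu => pvIns_getD_of_mem news (level + 1) dist u 0 hndn hu)
              (by
                intro x hx
                rw [hk₁] at hx
                rcases List.mem_append.1 hx with hx1 | hx2
                · exact hkeys x hx1
                · obtain ⟨u, _, hum⟩ := hmem x hx2
                  exact List.mem_cons_of_mem _ (nbrs_subset adj u x hum))
              (by
                rw [hk₁, List.length_append]
                have : 0 < frontier.length := List.length_pos_of_ne_nil hfr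
                rw [List.length_append] at hkeyslen
                omega)
              (by
                rw [hk₁, List.length_append]
                have : 0 < news.length := List.length_pos_of_ne_nil hn
                rw [List.length_append] at hkeyslen
                omega)
            rw [this, hk₁]
        · rw [if_neg hg]
          obtain ⟨g, gs, hgs⟩ : ∃ g gs, frontier.filter pyIsupper = g :: gs := by
            cases h : frontier.filter pyIsupper with
            | nil => exact absurd h hg
            | cons g gs => exact ⟨g, gs, rfl⟩
          obtain ⟨rest, hrit, hrval⟩ := suffix_vals (fuelA - frontier.length) adj
            (pvIns news (level + 1) dist) news (level + 1)
            (pvIns_nodup_keys news (level + 1) dist hnd)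
            (by
              intro v hv
              refine ⟨?_, ?_⟩
              · rw [PySem.Dict.contains_iff_mem_keys, hk₁]; simp [hv]
              · rw [pvIns_getD_of_mem news (level + 1) dist v 0 hndn hv])
          rw [hAstep, hrit, hit₁, hitems]
          rw [List.foldl_append, List.foldl_append, List.foldl_append,
            scan_skip pre _ hpre, scan_level, hgs]
          rw [scan_deep _ _ _ (by
              intro p hp
              obtain ⟨x, hx, rfl⟩ := List.mem_map.1 hp
              omega),
            scan_deep _ _ _ (by intro p hp; have := hrval p hp; omega)]
          rw [PySem.List.min?_id_cons]

-- ===== VERDICT (by name: the statement is the Claim_ definition above) =====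
theorem find_target_gateway_spec : Claim_equal_find_target_gateway := by
  intro adj virus _
  unfold Spec_find_target_gateway find_target_gateway find_target_gateway_alt pvBfs
  have hc : PySem.Dict.contains (PySem.Dict.empty : PySem.Dict String Int) virus = false := rfl
  have hkeys : (PySem.Dict.empty.insert virus (0 : Int)).keys = [virus] := by
    rw [PySem.Dict.keys_insert_of_not_contains _ _ hc]; rfl
  have hN : 1 ≤ pvNodeBound adj virus := by
    unfold pvNodeBound
    have : virus ∈ PySem.Set.ofList (virus :: (adj.map (·.2)).flatten) := by
      rw [PySem.Set.mem_ofList]; exact List.mem_cons_self ..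
    exact List.length_pos_of_mem this
  have h := main_sim (1 + pvNodeBound adj virus) adj virus
    (PySem.Dict.empty.insert virus 0) [virus] 0 [] (1 + pvNodeBound adj virus)
    (by rw [hkeys]; simp)
    (by rw [PySem.Dict.items_insert_of_not_contains _ _ hc]; rfl)
    (by simp)
    (by
      intro u hu
      rcases List.mem_singleton.1 hu with rfl
      rw [PySem.Dict.getD_insert]
      simp)
    (by
      intro x hx
      rw [hkeys] at hx
      rcases List.mem_singleton.1 hx with rfl
      exact List.mem_cons_self ..)
    (by rw [hkeys]; simp)
    (by rw [hkeys]; simp)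
  rw [h, hkeys, show (PySem.Set.ofList [virus] : List String) = [virus] from rfl]
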